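-- pv_equiv track=rewrite | github.com/zackees/soldr | src/soldr/setup_soldr_exporter.py | _strip_repo_input
-- ===== SOURCE A (Python) =====
-- def _strip_repo_input(action_text: str) -> str:
--     output_lines: list[str] = []
--     skipping_repo_input = False
--
--     for line in action_text.splitlines():
--         if skipping_repo_input:
--             if line.startswith('  ') and not line.startswith('    '):
--                 skipping_repo_input = False
--             else:
--                 continue
--
--         if line == '  repo:':
--             skipping_repo_input = True
--             continue
--
--         if 'INPUT_REPO:' in line:
--             continue
--
--         output_lines.append(line)
--
--     return '\n'.join(output_lines) + '\n'
-- ===== SOURCE B (Python) =====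
-- def _strip_repo_input(action_text: str) -> str:
--     done = []
--     cur = []
--     for line in action_text.splitlines():
--         if line.startswith('  ') and not line.startswith('    '):
--             done.append(cur)
--             cur = [line]
--         else:
--             cur.append(line)
--     done.append(cur)
--     kept = [ln for block in done
--             if not (block and block[0] == '  repo:')
--             for ln in block
--             if 'INPUT_REPO:' not in ln]
--     return '\n'.join(kept) + '\n'
-- ===== Notes on version B (the rewrite author's own statement) =====
-- stated objective: alternative
-- what changed: Replaces A's single-pass streaming scan with a mutable skip flag by a segment-then-filter pipeline: lines are first partitioned into blocks at every 2-indent key, then blocks headed ' repo:' are discarded and INPUT_REPO lines filtered out.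
import Mathlib
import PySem

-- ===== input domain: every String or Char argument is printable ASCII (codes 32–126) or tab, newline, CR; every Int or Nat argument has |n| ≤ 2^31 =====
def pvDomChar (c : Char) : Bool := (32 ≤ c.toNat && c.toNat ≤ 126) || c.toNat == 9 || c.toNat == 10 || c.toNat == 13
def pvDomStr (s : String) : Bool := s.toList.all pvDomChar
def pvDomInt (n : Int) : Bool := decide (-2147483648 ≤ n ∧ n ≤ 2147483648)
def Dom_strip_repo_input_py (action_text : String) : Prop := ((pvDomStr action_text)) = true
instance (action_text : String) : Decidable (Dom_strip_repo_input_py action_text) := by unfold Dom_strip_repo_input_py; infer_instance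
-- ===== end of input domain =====

-- B replaces A's streaming scan with a mutable skip flag by a segment-into-blocks-then-filter
-- pipeline (objective: alternative decomposition, same cost).

-- ===== PORT A =====
-- line.startswith('  ') and not line.startswith('    ')  (shared by both Pythons textually)
def pvIsKey (line : String) : Bool :=
  PySem.Str.startswith line "  " && !PySem.Str.startswith line "    "

-- A's per-line processing once past the skip check ('  repo:' test, INPUT_REPO test, append)
def pvProcessA (out : List String) (line : String) : List String × Bool :=
  if line == "  repo:" then (out, true)
  else if PySem.Str.isIn "INPUT_REPO:" line then (out, false)
  else (out ++ [line], false)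

-- one iteration of A's loop; state = (output_lines, skipping_repo_input)
def pvStepA (st : List String × Bool) (line : String) : List String × Bool :=
  if st.2 then
    if pvIsKey line then pvProcessA st.1 line else (st.1, true)
  else pvProcessA st.1 line

def strip_repo_input_py (action_text : String) : String :=
  let st := (PySem.Str.splitlines action_text).foldl pvStepA ([], false)
  PySem.Str.join "\n" st.1 ++ "\n"

-- ===== PORT B =====
-- not (block and block[0] == '  repo:')
def pvKeepBlock : List String → Bool
  | [] => true
  | h :: _ => !(h == "  repo:")

-- one iteration of B's partitioning loop; state = (done, cur)
def pvStepB (st : List (List String) × List String) (line : String) :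
    List (List String) × List String :=
  if pvIsKey line then (st.1 ++ [st.2], [line]) else (st.1, st.2 ++ [line])

def strip_repo_input_py_alt (action_text : String) : String :=
  let st := (PySem.Str.splitlines action_text).foldl pvStepB ([], [])
  let done := st.1 ++ [st.2]
  let kept := (done.filter pvKeepBlock).flatMap
    (fun b => b.filter (fun ln => !PySem.Str.isIn "INPUT_REPO:" ln))
  PySem.Str.join "\n" kept ++ "\n"

-- ===== PRECONDITION & SPEC =====
def Spec_strip_repo_input_py (action_text : String) (out : String) : Prop := out = strip_repo_input_py_alt action_text
instance (action_text : String) (out : String) : Decidable (Spec_strip_repo_input_py action_text out) := by unfold Spec_strip_repo_input_py; infer_instance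

-- ===== CLAIM (what is proved, stated in full; the proofs are below) =====
def Claim_equal_strip_repo_input_py : Prop := ∀ (action_text : String), Dom_strip_repo_input_py action_text → Spec_strip_repo_input_py action_text (strip_repo_input_py action_text)

-- ===== LEMMAS AND PROOFS =====

def pvFilt (b : List String) : List String :=
  b.filter (fun ln => !PySem.Str.isIn "INPUT_REPO:" ln)

def pvBout (blocks : List (List String)) : List String :=
  (blocks.filter pvKeepBlock).flatMap pvFilt

-- is the (unfinished) current block a repo block?  (= A's skip flag)
def pvIsRepo : List String → Bool
  | [] => false
  | h :: _ => h == "  repo:"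

lemma pvBout_snoc (xs : List (List String)) (b : List String) :
    pvBout (xs ++ [b]) = pvBout xs ++ (if pvKeepBlock b then pvFilt b else []) := by
  simp [pvBout, List.filter_append]
  cases h : pvKeepBlock b <;> simp [h]

lemma pvProcessA_eq (xs : List (List String)) (l : String) :
    pvProcessA (pvBout xs) l = (pvBout (xs ++ [[l]]), pvIsRepo [l]) := by
  rw [pvBout_snoc]
  by_cases hr : l = "  repo:"
  · simp [pvProcessA, pvIsRepo, pvKeepBlock, hr]
  · by_cases hi : PySem.Chars.isIn ['I','N','P','U','T','_','R','E','P','O',':'] l.toList = true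
    · simp [pvProcessA, pvIsRepo, pvKeepBlock, pvFilt, hr, hi]
    · simp [pvProcessA, pvIsRepo, pvKeepBlock, pvFilt, hr, hi]

lemma pvStepA_eq (done : List (List String)) (cur : List String) (l : String) :
    pvStepA (pvBout (done ++ [cur]), pvIsRepo cur) l =
      ((pvStepB (done, cur) l).1 ++ [(pvStepB (done, cur) l).2] |> pvBout,
       pvIsRepo (pvStepB (done, cur) l).2) := by
  by_cases hk : pvIsKey l = true
  · -- key line: A processes it whatever the flag; B starts a new block [l]
    have hA : pvStepA (pvBout (done ++ [cur]), pvIsRepo cur) l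
        = pvProcessA (pvBout (done ++ [cur])) l := by
      cases h : pvIsRepo cur <;> simp [pvStepA, hk]
    rw [hA, pvProcessA_eq]
    simp [pvStepB, hk]
  · -- non-key line: l ≠ '  repo:' since '  repo:' is a key
    have hrepo : l ≠ "  repo:" := by
      intro h; subst h; exact hk (by decide)
    have hB : pvStepB (done, cur) l = (done, cur ++ [l]) := by simp [pvStepB, hk]
    rw [hB]
    cases cur with
    | nil =>
        simpa [pvStepA, pvIsRepo, pvBout_snoc, pvKeepBlock, pvFilt]
          using pvProcessA_eq done l
    | cons h t =>
        by_cases hr : h = "  repo:"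
        · simp [pvStepA, pvIsRepo, hr, hk, pvBout_snoc, pvKeepBlock]
        · by_cases hi : PySem.Chars.isIn ['I','N','P','U','T','_','R','E','P','O',':'] l.toList = true
          · simp [pvStepA, pvIsRepo, hr, pvProcessA, hrepo, hi,
              pvBout_snoc, pvKeepBlock, pvFilt, List.filter_cons, List.filter_append]
          · simp [pvStepA, pvIsRepo, hr, pvProcessA, hrepo, hi,
              pvBout_snoc, pvKeepBlock, pvFilt, List.filter_cons, List.filter_append]
            split <;> simp

lemma pvMain (lines : List String) :
    ∀ (done : List (List String)) (cur : List String),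
      (lines.foldl pvStepA (pvBout (done ++ [cur]), pvIsRepo cur)).1
        = pvBout ((lines.foldl pvStepB (done, cur)).1 ++ [(lines.foldl pvStepB (done, cur)).2]) := by
  induction lines with
  | nil => intro done cur; simp
  | cons l rest ih =>
      intro done cur
      simp only [List.foldl_cons, pvStepA_eq done cur l]
      have := ih (pvStepB (done, cur) l).1 (pvStepB (done, cur) l).2
      simpa using this

-- ===== VERDICT (by name: the statement is the Claim_ definition above) =====
theorem strip_repo_input_py_spec : Claim_equal_strip_repo_input_py := by
  intro action_text _
  unfold Spec_strip_repo_input_py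
  have h := pvMain (PySem.Str.splitlines action_text) [] []
  simp [pvBout, pvIsRepo, pvKeepBlock, pvFilt] at h
  simp [strip_repo_input_py, strip_repo_input_py_alt, h]
  rfl
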